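-- pv_equiv track=rewrite | github.com/WilliothRivera/RedesBayesianasPython | interfazRedesBayesianas.py | trazasID
-- ===== SOURCE A (Python) =====
-- from string import ascii_uppercase as MAYUS
--
-- def trazasID(lista):
--     #identificadores servirá para almacenar los valores únicos de los datos de entrada
--     identificadores = []
--     #la lista traza nos será de ayuda para darle el formato correcto a la lista de bitacoras
--     traza = []
--     #la lista de bitacora almacenará las bitacora unicamente con los identificadores en letras
--     bitacora = []
--     #el diccionario IDS nos servirá para intercambiar los valores de identificadores
--     #con las letras del abecedario
--     IDS = {}
--
--     #Iteramos sobre los valores de la lista palabra por palabra, si encontramos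
--     #una nueva ocurrencia de palabra, lo añadimos a la lista identificadores
--     for linea in lista:
--         for palabra in linea:
--             if palabra not in identificadores:
--                 identificadores.append(palabra)
--
--     #llenamos nuestro diccionario de IDS, iteramos en la lista de identificadores
--     #que contiene valores unicos de ocurrencias, y los vamos añadiendo en el diccionario
--     #MAYUS contiene las letras mayúsculas del alfabeto, y se importa al inicio
--     #en el diccionario IDS, añadimos el nombre de la actividad a KEY
--     #y el identificador de la actividad (letra del abecedario) a VALUE
--     for x in range(0, len(identificadores)):
--         IDS[identificadores[x]] = (MAYUS[x])
--
--     #Recorremos nuestra lista inicial, comparando cada palabra con el valor en diccionario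
--     #cuando haya una coincidencia de nombre de la actividad con la KEY del diccionario
--     #se agrega el VALUE del diccionario (letra del abecedario) a nuestra lista de trazas
--     for linea in lista:
--         for palabra in linea:
--             for key in IDS:
--                 if palabra == key:
--                     #agregamos la letra del abecedario a la traza
--                     traza.append(IDS[key])
--         #agregamos la traza a la bitacora
--         bitacora.append(traza)
--         #limpiamos la traza para la siguiente iteración
--         traza=[]
--
--     return IDS, bitacora
-- ===== SOURCE B (Python) =====
-- from string import ascii_uppercase as MAYUS
--
-- def trazasID(lista):
--     # Single pass: assign letters lazily while encoding, instead of A's three passes.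
--     IDS = {}
--     bitacora = []
--     for linea in lista:
--         traza = []
--         for palabra in linea:
--             letra = IDS.get(palabra)
--             if letra is None:
--                 letra = MAYUS[len(IDS)]
--                 IDS[palabra] = letra
--             traza.append(letra)
--         bitacora.append(traza)
--     return IDS, bitacora
-- ===== Notes on version B (the rewrite author's own statement) =====
-- stated objective: alternative
-- what changed: Replaces A's three passes (collect unique words, build the dict over a range, re-encode with an inner scan over all dict keys per word) by one pass that assigns letters lazily on first sight and encodes each word by a single dict lookup.
import Mathlib
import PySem

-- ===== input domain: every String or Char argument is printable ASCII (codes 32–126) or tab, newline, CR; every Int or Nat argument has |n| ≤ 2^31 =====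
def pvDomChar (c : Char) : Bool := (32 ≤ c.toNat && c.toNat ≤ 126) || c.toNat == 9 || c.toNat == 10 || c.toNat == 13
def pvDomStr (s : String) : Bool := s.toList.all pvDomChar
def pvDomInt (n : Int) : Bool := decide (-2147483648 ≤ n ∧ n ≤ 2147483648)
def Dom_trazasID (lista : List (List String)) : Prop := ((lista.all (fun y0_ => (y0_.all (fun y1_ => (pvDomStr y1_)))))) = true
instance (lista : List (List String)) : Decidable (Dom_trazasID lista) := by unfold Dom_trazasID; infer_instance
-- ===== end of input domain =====

-- B replaces A's three passes by one pass that assigns letters lazily while encoding each word by a dict lookup.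

-- shared module context: `from string import ascii_uppercase as MAYUS`
def MAYUS : String := "ABCDEFGHIJKLMNOPQRSTUVWXYZ"
-- MAYUS[i] as the 1-character Python string; "" only where Python raises IndexError (excluded by Pre_)
def mayusAt (i : Int) : String := ((PySem.Str.pyGet? MAYUS i).map (fun c => String.ofList [c])).getD ""

-- ===== PORT A =====
-- (Python's `traza` is emptied after each linea; modelled as a fresh [] per linea.)
def trazasID (lista : List (List String)) : (List (String × String)) × List (List String) :=
  let identificadores : List String :=
    lista.foldl (fun ids linea =>
      linea.foldl (fun ids palabra => if palabra ∈ ids then ids else ids ++ [palabra]) ids) []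
  let IDS : PySem.Dict String String :=
    (PySem.List.pyRange 0 identificadores.length 1).foldl
      (fun d x => d.insert (PySem.List.pyGetD identificadores x "") (mayusAt x)) PySem.Dict.empty
  let bitacora : List (List String) :=
    lista.foldl (fun b linea =>
      b ++ [linea.foldl (fun t palabra =>
        IDS.keys.foldl (fun t key => if palabra == key then t ++ [IDS.getD key ""] else t) t) []]) []
  (IDS.items, bitacora)

-- ===== PORT B =====
def trazasID_alt (lista : List (List String)) : (List (String × String)) × List (List String) :=
  let st :=
    lista.foldl (fun (st : PySem.Dict String String × List (List String)) linea =>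
      let inner :=
        linea.foldl (fun (st2 : PySem.Dict String String × List String) palabra =>
          match st2.1.get? palabra with
          | some letra => (st2.1, st2.2 ++ [letra])
          | none =>
            let letra := mayusAt (st2.1.size : Int)
            (st2.1.insert palabra letra, st2.2 ++ [letra])) (st.1, ([] : List String))
      (inner.1, st.2 ++ [inner.2])) (PySem.Dict.empty, [])
  (st.1.items, st.2)

-- ===== PRECONDITION & SPEC =====
-- Pre_ excludes inputs with more than 26 distinct words, on which Python A (and B) raises IndexError (MAYUS[x]).
def Pre_trazasID (lista : List (List String)) : Prop := (PySem.Set.ofList lista.flatten).length ≤ 26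
instance (lista : List (List String)) : Decidable (Pre_trazasID lista) := by unfold Pre_trazasID; infer_instance
def pvWitness_trazasID : List (List String) := [["go", "stop"], ["stop", "go", "eat"]]

def Spec_trazasID (lista : List (List String)) (out : (List (String × String)) × List (List String)) : Prop := out = trazasID_alt lista
instance (lista : List (List String)) (out : (List (String × String)) × List (List String)) : Decidable (Spec_trazasID lista out) := by unfold Spec_trazasID; infer_instance

-- ===== CLAIM (what is proved, stated in full; the proofs are below) =====
def Claim_equal_trazasID : Prop := ∀ (lista : List (List String)), Dom_trazasID lista → Pre_trazasID lista → Spec_trazasID lista (trazasID lista)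

-- ===== LEMMAS AND PROOFS =====

-- A's running list of first occurrences, one word / one line at a time
def uput (u : List String) (p : String) : List String := if p ∈ u then u else u ++ [p]
def uline (u : List String) (l : List String) : List String := l.foldl uput u
-- the letter dictionary determined by a first-occurrence list
def M (u : List String) : PySem.Dict String String :=
  (u.zipIdx).foldl (fun d pi => d.insert pi.1 (mayusAt (pi.2 : Int))) PySem.Dict.empty

theorem nodup_snoc (u : List String) (p : String) (h : u.Nodup) (hp : p ∉ u) : (u ++ [p]).Nodup := by
  rw [List.nodup_append]
  exact ⟨h, List.nodup_singleton p, fun a ha b hb => by simp at hb; exact fun he => hp ((hb ▸ he) ▸ ha)⟩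

theorem nodup_snoc_inv (u : List String) (p : String) (h : (u ++ [p]).Nodup) : u.Nodup ∧ p ∉ u := by
  rw [List.nodup_append] at h
  exact ⟨h.1, fun hc => h.2.2 p hc p (by simp) rfl⟩

theorem nodup_uput (u : List String) (p : String) (h : u.Nodup) : (uput u p).Nodup := by
  unfold uput; split_ifs with hm
  · exact h
  · exact nodup_snoc u p h hm

theorem mem_uput_left (u : List String) (p q : String) (h : q ∈ u) : q ∈ uput u p := by
  unfold uput; split_ifs <;> simp [h]

theorem mem_uput_self (u : List String) (p : String) : p ∈ uput u p := by
  unfold uput; split_ifs with hm <;> simp [hm]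

theorem nodup_uline (l : List String) (u : List String) (h : u.Nodup) : (uline u l).Nodup := by
  induction l generalizing u with
  | nil => exact h
  | cons x xs ih => exact ih _ (nodup_uput _ _ h)

theorem mem_uline_left (l : List String) (u : List String) (q : String) (h : q ∈ u) : q ∈ uline u l := by
  induction l generalizing u with
  | nil => exact h
  | cons x xs ih => exact ih _ (mem_uput_left _ _ _ h)

theorem mem_uline_of_mem (l : List String) (u : List String) (p : String) (h : p ∈ l) : p ∈ uline u l := by
  induction l generalizing u with
  | nil => cases h
  | cons x xs ih =>
    rcases List.mem_cons.mp h with h | h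
    · exact h ▸ mem_uline_left xs (uput u x) x (mem_uput_self u x)
    · exact ih _ h

theorem M_snoc (u : List String) (p : String) :
    M (u ++ [p]) = (M u).insert p (mayusAt (u.length : Int)) := by
  unfold M
  rw [List.zipIdx_append, List.foldl_append]
  simp

theorem keys_M (u : List String) (h : u.Nodup) : (M u).keys = u := by
  induction u using List.reverseRecOn with
  | nil => simp [M]
  | append_singleton u p ih =>
    obtain ⟨hu, hp⟩ := nodup_snoc_inv u p h
    rw [M_snoc, PySem.Dict.keys_insert_of_not_contains, ih hu]
    rw [← Bool.not_eq_true, PySem.Dict.contains_iff_mem_keys, ih hu]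
    exact hp

theorem size_M (u : List String) (h : u.Nodup) : (M u).size = u.length := by
  induction u using List.reverseRecOn with
  | nil => simp [M]
  | append_singleton u p ih =>
    obtain ⟨hu, hp⟩ := nodup_snoc_inv u p h
    rw [M_snoc, PySem.Dict.size_insert, ih hu]
    have : (M u).contains p = false := by
      rw [← Bool.not_eq_true, PySem.Dict.contains_iff_mem_keys, keys_M u hu]; exact hp
    simp [this]

theorem get?_M_uput (u : List String) (p q : String) (hp : p ∈ u) :
    (M (uput u q)).get? p = (M u).get? p := by
  unfold uput; split_ifs with hm
  · rfl
  · rw [M_snoc, PySem.Dict.get?_insert_of_ne]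
    intro hc; exact hm (hc ▸ hp)

theorem get?_M_uline (l : List String) : ∀ (u : List String) (p : String), p ∈ u →
    (M (uline u l)).get? p = (M u).get? p := by
  induction l with
  | nil => intro u p _; rfl
  | cons x xs ih =>
    intro u p hp
    rw [uline, List.foldl_cons, ← uline, ih (uput u x) p (mem_uput_left u x p hp),
      get?_M_uput u p x hp]

theorem get?_M_ufold (rest : List (List String)) : ∀ (u : List String) (p : String), p ∈ u →
    (M (rest.foldl uline u)).get? p = (M u).get? p := by
  induction rest with
  | nil => intro u p _; rfl
  | cons l ls ih =>
    intro u p hp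
    rw [List.foldl_cons, ih _ _ (mem_uline_left l u p hp), get?_M_uline l u p hp]

theorem mem_ufold (rest : List (List String)) : ∀ (u : List String) (q : String), q ∈ u →
    q ∈ rest.foldl uline u := by
  induction rest with
  | nil => intro u q h; exact h
  | cons l ls ih => intro u q h; exact ih _ _ (mem_uline_left l u q h)

theorem words_mem_ufold (rest : List (List String)) (linea : List String) (p : String)
    (hl : linea ∈ rest) (hp : p ∈ linea) : ∀ (u : List String), p ∈ rest.foldl uline u := by
  induction rest with
  | nil => cases hl
  | cons l ls ih =>
    intro u
    rcases List.mem_cons.mp hl with h | h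
    · exact mem_ufold ls _ _ (mem_uline_of_mem l u p (h ▸ hp))
    · rw [List.foldl_cons]; exact ih h (uline u l)

-- A's range-indexed dict fold builds M
theorem dictA_eq (u : List String) :
    (PySem.List.pyRange 0 (u.length : Int) 1).foldl
      (fun d x => d.insert (PySem.List.pyGetD u x "") (mayusAt x)) PySem.Dict.empty = M u := by
  rw [PySem.List.pyRange_zero_natCast, List.foldl_map]
  induction u using List.reverseRecOn with
  | nil => simp [M]
  | append_singleton u p ih =>
    rw [List.length_append, List.length_cons, List.length_nil, List.range_succ, List.foldl_append]
    have hpre : (List.range u.length).foldl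
        (fun d (i : Nat) => d.insert (PySem.List.pyGetD (u ++ [p]) (i : Int) "") (mayusAt (i : Int)))
        PySem.Dict.empty = M u := by
      rw [PySem.List.foldl_congr_mem _ _
        (fun d (i : Nat) => d.insert (PySem.List.pyGetD u (i : Int) "") (mayusAt (i : Int))) _ ?_]
      · exact ih
      · intro acc i hi
        have hilt : i < u.length := List.mem_range.mp hi
        simp only [PySem.List.pyGetD_natCast]
        rw [List.getD_append _ _ _ _ hilt]
    simp only [List.foldl_cons, List.foldl_nil]
    rw [hpre, M_snoc]
    congr 1
    rw [PySem.List.pyGetD_natCast]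
    simp [List.getD]

theorem filter_beq_singleton (U : List String) (p : String) (hnd : U.Nodup) (hm : p ∈ U) :
    U.filter (fun k => p == k) = [p] := by
  induction U with
  | nil => cases hm
  | cons x xs ih =>
    rcases List.mem_cons.mp hm with h | h
    · subst h
      have hnil : xs.filter (fun k => p == k) = [] := by
        rw [List.filter_eq_nil_iff]
        intro a ha hc
        exact (List.nodup_cons.mp hnd).1 ((beq_iff_eq.mp hc) ▸ ha)
      simp [hnil]
    · have hne : p ≠ x := by
        intro hc; exact (List.nodup_cons.mp hnd).1 (hc ▸ h)
      simp [hne, ih (List.nodup_cons.mp hnd).2 h]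

-- characterization of A
theorem A_char (lista : List (List String)) :
    trazasID lista =
      ((M (lista.foldl uline [])).items,
       lista.map (fun linea => linea.map (fun p => (M (lista.foldl uline [])).getD p ""))) := by
  have hU : lista.foldl uline [] =
      lista.foldl (fun ids linea =>
        linea.foldl (fun ids palabra => if palabra ∈ ids then ids else ids ++ [palabra]) ids) [] := rfl
  simp only [trazasID]
  rw [← hU, dictA_eq]
  set U := lista.foldl uline [] with hUdef
  have hnd : U.Nodup := by
    rw [hUdef]
    have : ∀ (rest : List (List String)) (u : List String), u.Nodup → (rest.foldl uline u).Nodup := by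
      intro rest
      induction rest with
      | nil => intro u h; exact h
      | cons l ls ih => intro u h; exact ih _ (nodup_uline _ _ h)
    exact this lista [] List.nodup_nil
  refine congrArg (Prod.mk ((M U).items)) ?_
  rw [PySem.List.foldl_congr_mem _ _
    (fun b linea => b ++ [linea.map (fun p => (M U).getD p "")]) _ ?_]
  · rw [PySem.List.foldl_append_singleton_eq_map]; simp
  · intro b linea hlin
    congr 1
    rw [PySem.List.foldl_congr_mem _ _ (fun t p => t ++ [(M U).getD p ""]) _ ?_]
    · rw [PySem.List.foldl_append_singleton_eq_map]; simp
    · intro t p hp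
      rw [keys_M U hnd, PySem.List.foldl_append_if (fun k => p == k) (fun k => (M U).getD k "") U t]
      rw [filter_beq_singleton U p hnd (words_mem_ufold lista linea p hlin hp [])]
      simp

-- B's inner and outer loop bodies, named for the proofs (definitionally the lambdas of trazasID_alt)
def bstep (st2 : PySem.Dict String String × List String) (palabra : String) :
    PySem.Dict String String × List String :=
  match st2.1.get? palabra with
  | some letra => (st2.1, st2.2 ++ [letra])
  | none =>
    let letra := mayusAt ((st2.1.size : Int))
    (st2.1.insert palabra letra, st2.2 ++ [letra])

def bline (st : PySem.Dict String String × List (List String)) (linea : List String) :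
    PySem.Dict String String × List (List String) :=
  let inner := linea.foldl bstep (st.1, ([] : List String))
  (inner.1, st.2 ++ [inner.2])

theorem bstep_some (st2 : PySem.Dict String String × List String) (p : String) (v : String)
    (hg : st2.1.get? p = some v) : bstep st2 p = (st2.1, st2.2 ++ [v]) := by
  simp [bstep, hg]

theorem bstep_none (st2 : PySem.Dict String String × List String) (p : String)
    (hg : st2.1.get? p = none) :
    bstep st2 p = (st2.1.insert p (mayusAt ((st2.1.size : Int))), st2.2 ++ [mayusAt ((st2.1.size : Int))]) := by
  simp [bstep, hg]

-- characterization of B: inner loop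
theorem B_inner (l : List String) : ∀ (u t : List String), u.Nodup →
    l.foldl bstep (M u, t)
      = (M (uline u l), t ++ l.map (fun p => (M (uline u l)).getD p "")) := by
  induction l with
  | nil => intro u t _; simp [uline]
  | cons p ps ih =>
    intro u t h
    rw [List.foldl_cons]
    rcases hg : (M u).get? p with _ | v
    · -- unseen word
      have hp : p ∉ u := by
        have := (PySem.Dict.get?_eq_none_iff_not_mem_keys (M u) p).mp hg
        rwa [keys_M u h] at this
      have hput : uput u p = u ++ [p] := by unfold uput; simp [hp]
      have hnd' : (u ++ [p]).Nodup := nodup_snoc u p h hp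
      rw [bstep_none (M u, t) p hg]
      have hstep : (M u).insert p (mayusAt (((M u, t).1.size : Int))) = M (u ++ [p]) := by
        rw [M_snoc, size_M u h]
      rw [hstep, ih (u ++ [p]) _ hnd']
      have huu : uline (u ++ [p]) ps = uline u (p :: ps) := by
        rw [uline, uline, List.foldl_cons, hput]
      rw [huu]
      have hlook : (M (uline u (p :: ps))).getD p "" = mayusAt (((M u, t).1.size : Int)) := by
        rw [PySem.Dict.getD_eq_get?_getD, ← huu, get?_M_uline ps (u ++ [p]) p (by simp)]
        rw [M_snoc, size_M u h, PySem.Dict.get?_insert_self]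
        rfl
      rw [List.map_cons, hlook]
      simp
    · -- seen word
      have hp : p ∈ u := by
        by_contra hc
        rw [(PySem.Dict.get?_eq_none_iff_not_mem_keys (M u) p).mpr (by rwa [keys_M u h])] at hg
        cases hg
      have hput : uput u p = u := by unfold uput; simp [hp]
      rw [bstep_some (M u, t) p v hg, ih u _ h]
      have huu : uline u ps = uline u (p :: ps) := by
        rw [uline, uline, List.foldl_cons, hput]
      rw [huu]
      have hlook : (M (uline u (p :: ps))).getD p "" = v := by
        rw [PySem.Dict.getD_eq_get?_getD, ← huu, get?_M_uline ps u p hp, hg]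
        rfl
      rw [List.map_cons, hlook]
      simp

-- characterization of B: outer loop
theorem B_outer (rest : List (List String)) : ∀ (u : List String) (bit : List (List String)),
    u.Nodup →
    rest.foldl bline (M u, bit)
      = (M (rest.foldl uline u),
         bit ++ rest.map (fun linea => linea.map (fun p => (M (rest.foldl uline u)).getD p ""))) := by
  induction rest with
  | nil => intro u bit _; simp
  | cons l ls ih =>
    intro u bit h
    rw [List.foldl_cons]
    have hline : bline (M u, bit) l
        = (M (uline u l), bit ++ [l.map (fun p => (M (uline u l)).getD p "")]) := by
      simp only [bline]
      rw [B_inner l u [] h]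
      simp
    rw [hline, ih (uline u l) _ (nodup_uline _ _ h), List.foldl_cons]
    have hmap : l.map (fun p => (M (uline u l)).getD p "")
        = l.map (fun p => (M (ls.foldl uline (uline u l))).getD p "") := by
      apply List.map_congr_left
      intro p hp
      rw [PySem.Dict.getD_eq_get?_getD, PySem.Dict.getD_eq_get?_getD,
        get?_M_ufold ls (uline u l) p (mem_uline_of_mem l u p hp)]
    rw [hmap]
    simp

-- ===== VERDICT (by name: the statement is the Claim_ definition above) =====
theorem trazasID_spec : Claim_equal_trazasID := by
  intro lista _ _
  unfold Spec_trazasID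
  rw [A_char]
  have hport : trazasID_alt lista
      = ((lista.foldl bline (PySem.Dict.empty, [])).1.items,
         (lista.foldl bline (PySem.Dict.empty, [])).2) := rfl
  rw [hport,
    show (PySem.Dict.empty, ([] : List (List String))) = (M [], ([] : List (List String))) from rfl,
    B_outer lista [] [] List.nodup_nil]
  simp
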